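-- pv_equiv track=rewrite | github.com/harshit-sh/codejam_2014_round0 | war_3/war_final.py | fairWar
-- ===== SOURCE A (Python) =====
-- def fairWar( l1,l2 ):
-- 	l1.sort()
-- 	l2.sort()
-- 	points = 0
-- 	n = len(l1)
-- 	if n == 1:
-- 		if l1[0] > l2[0]:
-- 			points = points + 1
-- 		return points
-- 	else:
-- 		i = 0
-- 		while i < len(l2):
-- 			if l2[i] > l1[0]:
-- 				l2.pop(i)
-- 				l1.pop(0)
-- 			else:
-- 				points = points + 1
-- 				i += 1
-- 		return points
-- ===== SOURCE B (Python) =====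
-- def fairWar(l1, l2):
--     l1.sort()
--     l2.sort()
--     if len(l1) == 1:
--         return 1 if l1[0] > l2[0] else 0
--     points = 0
--     j = 0
--     for x in l2:
--         if x > l1[j]:
--             j += 1
--         else:
--             points += 1
--     return points
-- ===== Notes on version B (the rewrite author's own statement) =====
-- stated objective: faster
-- what changed: Replaced the pop-based while loop (each l2.pop(i)/l1.pop(0) shifts the whole list, O(n) per round) with a single two-pointer pass over sorted l2 using a front index j into l1, no list mutation inside the loop; the n==1 special case is kept.
import Mathlib
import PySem

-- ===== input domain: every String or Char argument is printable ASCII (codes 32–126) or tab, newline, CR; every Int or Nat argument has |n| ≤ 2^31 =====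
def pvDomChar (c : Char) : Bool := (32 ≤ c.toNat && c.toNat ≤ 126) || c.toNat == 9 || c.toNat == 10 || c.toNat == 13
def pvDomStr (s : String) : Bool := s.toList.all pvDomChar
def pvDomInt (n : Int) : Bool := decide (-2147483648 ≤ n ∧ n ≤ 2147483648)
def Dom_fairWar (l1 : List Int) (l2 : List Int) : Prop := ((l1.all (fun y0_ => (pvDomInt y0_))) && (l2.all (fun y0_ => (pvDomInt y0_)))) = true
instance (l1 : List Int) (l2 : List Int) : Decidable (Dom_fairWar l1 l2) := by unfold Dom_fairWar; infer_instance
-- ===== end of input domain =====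

-- B replaces A's quadratic pop-based while loop with one two-pointer pass over the
-- sorted lists (front index j into l1 instead of repeated l1.pop(0)/l2.pop(i)).
-- Both A and B sort l1 and l2 in place; the equivalence proved is about the return value.

-- ===== PORT A =====
-- A's while loop: state (l1, l2, i, points); l2.pop(i) = eraseIdx, l1.pop(0) = tail.
-- l1[0] / l2[i] are in range on every input admitted by Pre_; getD 0 is exact there.
def fairWarLoop (l1 : List Int) (l2 : List Int) (i : Nat) (points : Int) : Int :=
  if h : i < l2.length then
    if l2.getD i 0 > l1.getD 0 0 then
      fairWarLoop l1.tail (l2.eraseIdx i) i points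
    else
      fairWarLoop l1 l2 (i + 1) (points + 1)
  else points
termination_by l2.length - i
decreasing_by
  · have : (l2.eraseIdx i).length = l2.length - 1 := List.length_eraseIdx_of_lt h
    omega
  · omega

def fairWar (l1 : List Int) (l2 : List Int) : Int :=
  let s1 := PySem.List.sorted l1 (fun x => x) false
  let s2 := PySem.List.sorted l2 (fun x => x) false
  if s1.length = 1 then
    (if s1.getD 0 0 > s2.getD 0 0 then (0 : Int) + 1 else 0)
  else
    fairWarLoop s1 s2 0 0

-- ===== PORT B =====
-- B's for loop over sorted l2 with state (j, points); l1[j] is in range under Pre_.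
def fairWar_alt (l1 : List Int) (l2 : List Int) : Int :=
  let s1 := PySem.List.sorted l1 (fun x => x) false
  let s2 := PySem.List.sorted l2 (fun x => x) false
  if s1.length = 1 then
    (if s1.getD 0 0 > s2.getD 0 0 then (1 : Int) else 0)
  else
    (s2.foldl (fun (st : Nat × Int) x =>
        if x > s1.getD st.1 0 then (st.1 + 1, st.2) else (st.1, st.2 + 1))
      (0, 0)).2

-- ===== PRECONDITION & SPEC =====
-- Pre_ excludes EXACTLY the inputs on which the Python A raises IndexError (B raises
-- there too): len(l1)==1 with l2 empty, or (len(l1)!=1 and) l2 at least one element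
-- longer than l1 with the top len(l1) elements of sorted l2, excluding its maximum,
-- pairwise beating sorted l1 — then l1 is emptied by pops while l2 elements remain.
def Pre_fairWar (l1 : List Int) (l2 : List Int) : Prop :=
  if l1.length = 1 then l2 ≠ []
  else ¬ (l1.length + 1 ≤ l2.length ∧
    ∀ t < l1.length,
      (PySem.List.sorted l2 (fun x => x) false).getD (l2.length - 1 - l1.length + t) 0 >
        (PySem.List.sorted l1 (fun x => x) false).getD t 0)
instance (l1 : List Int) (l2 : List Int) : Decidable (Pre_fairWar l1 l2) := by
  unfold Pre_fairWar; infer_instance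

def pvWitness_fairWar : List Int × List Int := ([3, 1, 4], [2, 5, 0])

def Spec_fairWar (l1 : List Int) (l2 : List Int) (out : Int) : Prop := out = fairWar_alt l1 l2
instance (l1 : List Int) (l2 : List Int) (out : Int) : Decidable (Spec_fairWar l1 l2 out) := by
  unfold Spec_fairWar; infer_instance

-- ===== CLAIM (what is proved, stated in full; the proofs are below) =====
def Claim_equal_fairWar : Prop := ∀ (l1 : List Int) (l2 : List Int), Dom_fairWar l1 l2 → Pre_fairWar l1 l2 → Spec_fairWar l1 l2 (fairWar l1 l2)

-- ===== LEMMAS AND PROOFS =====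

-- head of a dropped list = indexed element (with the same default)
theorem getD_drop_zero (l : List Int) (j : Nat) :
    (l.drop j).getD 0 0 = l.getD j 0 := by
  simp [List.getD, List.getElem?_drop]

-- A's loop state (drop j s1, kept ++ rest, i = kept.length) computes B's fold over rest
-- with state (j, points); this holds for arbitrary lists, no sortedness needed.
theorem loopA_eq_fold (s1 : List Int) (rest kept : List Int) (j : Nat) (points : Int) :
    fairWarLoop (s1.drop j) (kept ++ rest) kept.length points =
      (rest.foldl (fun (st : Nat × Int) x =>
          if x > s1.getD st.1 0 then (st.1 + 1, st.2) else (st.1, st.2 + 1))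
        (j, points)).2 := by
  induction rest generalizing kept j points with
  | nil =>
      rw [fairWarLoop]
      simp
  | cons x rest ih =>
      rw [fairWarLoop]
      have hlt : kept.length < (kept ++ x :: rest).length := by simp
      have hget : (kept ++ x :: rest).getD kept.length 0 = x := by
        simp [List.getD]
      have hhead : (s1.drop j).getD 0 0 = s1.getD j 0 := getD_drop_zero s1 j
      rw [dif_pos hlt, hget, hhead]
      by_cases hc : x > s1.getD j 0
      · rw [if_pos hc]
        have htail : (s1.drop j).tail = s1.drop (j + 1) := by
          rw [List.tail_drop]
        have herase : (kept ++ x :: rest).eraseIdx kept.length = kept ++ rest := by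
          simpa using List.eraseIdx_append_of_length_le (Nat.le_refl kept.length) (x :: rest)
        rw [htail, herase, ih kept (j + 1) points]
        rw [List.foldl_cons, if_pos hc]
      · rw [if_neg hc]
        have hsplit : kept ++ x :: rest = (kept ++ [x]) ++ rest := by simp
        have hlen : kept.length + 1 = (kept ++ [x]).length := by simp
        rw [hsplit, hlen, ih (kept ++ [x]) j (points + 1)]
        rw [List.foldl_cons, if_neg hc]

-- ===== VERDICT (by name: the statement is the Claim_ definition above) =====
theorem fairWar_spec : Claim_equal_fairWar := by
  intro l1 l2 _ _
  unfold Spec_fairWar fairWar fairWar_alt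
  by_cases h : (PySem.List.sorted l1 (fun x => x) false).length = 1
  · simp only [h, if_pos]
    split <;> rfl
  · simp only [h, if_false]
    have := loopA_eq_fold (PySem.List.sorted l1 (fun x => x) false)
      (PySem.List.sorted l2 (fun x => x) false) [] 0 0
    simpa using this
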